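-- pv_equiv track=rewrite | github.com/Yu-Fangxu/FoR | 1D-ARC/utils_arc.py | get_pixel_coords
-- ===== SOURCE A (Python) =====
-- def get_pixel_coords(grid):
--     ''' Gets the coords of all the pixel values '''
--     pixel_coord = {}
--     for row in range(len(grid)):
--         for col in range(len(grid[0])):
--             for value in 'abcdefghij':
--                 if grid[row][col] == value:
--                     if value in pixel_coord:
--                         pixel_coord[value].append((row,col))
--                     else:
--                         pixel_coord[value] = [(row,col)]
--     return dict(sorted(pixel_coord.items(), key = lambda x: -len(x[1])))
-- ===== SOURCE B (Python) =====
-- def get_pixel_coords(grid):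
--     ''' Gets the coords of all the pixel values '''
--     items = []
--     for value in 'abcdefghij':
--         coords = [(row, col) for row in range(len(grid)) for col in range(len(grid[0])) if grid[row][col] == value]
--         if coords:
--             items.append((value, coords))
--     # sort by frequency (desc); ties keep first-occurrence order = order of the first coordinate
--     items.sort(key=lambda it: (-len(it[1]), it[1][0]))
--     return dict(items)
-- ===== Notes on version B (the rewrite author's own statement) =====
-- stated objective: alternative
-- what changed: A groups coordinates cell by cell into a dict via a triple nested loop and then stably sorts the dict items by frequency alone; B instead makes one full-grid scan per candidate value 'a'..'j' collecting that value's coordinate list directly, and sorts the collected items with the explicit key (-count, first coordinate), which reproduces A's first-occurrence tie-breaking.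
import Mathlib
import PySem

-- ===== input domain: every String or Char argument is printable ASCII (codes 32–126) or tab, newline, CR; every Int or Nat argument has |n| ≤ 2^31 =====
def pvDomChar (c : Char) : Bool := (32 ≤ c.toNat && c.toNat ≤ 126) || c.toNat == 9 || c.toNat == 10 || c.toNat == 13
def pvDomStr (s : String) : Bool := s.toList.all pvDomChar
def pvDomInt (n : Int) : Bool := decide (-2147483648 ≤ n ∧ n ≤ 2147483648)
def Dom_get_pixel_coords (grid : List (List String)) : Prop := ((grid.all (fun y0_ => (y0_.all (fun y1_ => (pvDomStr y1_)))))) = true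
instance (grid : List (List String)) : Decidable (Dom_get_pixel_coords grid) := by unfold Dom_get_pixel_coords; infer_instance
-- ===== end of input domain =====

-- B replaces A's cell-by-cell dict grouping (triple nested loop, stable sort on frequency only)
-- by one scan per candidate value with an explicit sort key (-count, first coordinate); objective: alternative.

-- iterating the Python literal 'abcdefghij' yields its ten 1-character strings, in order
def pvAlpha : List String := ["a", "b", "c", "d", "e", "f", "g", "h", "i", "j"]

-- ===== PORT A =====
def get_pixel_coords (grid : List (List String)) : List (String × List (Int × Int)) :=
  let pixel_coord : PySem.Dict String (List (Int × Int)) :=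
    (PySem.List.pyRange 0 (grid.length : Int)).foldl (fun d row =>
      (PySem.List.pyRange 0 ((PySem.List.pyGetD grid 0 []).length : Int)).foldl (fun d col =>
        pvAlpha.foldl (fun d value =>
          if PySem.List.pyGetD (PySem.List.pyGetD grid row []) col "" == value then
            (if d.contains value then d.modify value [] (fun l => l ++ [(row, col)])
             else d.insert value [(row, col)])
          else d) d) d) PySem.Dict.empty
  (PySem.Dict.ofList (PySem.List.sorted pixel_coord.items (fun x => -(x.2.length : Int)))).items

-- ===== PORT B =====
-- the Python tuple key (-len, coords[0]) compares lexicographically: the coordinate component is Lex (Int × Int)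
def get_pixel_coords_alt (grid : List (List String)) : List (String × List (Int × Int)) :=
  let items : List (String × List (Int × Int)) :=
    pvAlpha.foldl (fun acc value =>
      let coords : List (Int × Int) :=
        (PySem.List.pyRange 0 (grid.length : Int)).foldl (fun cs row =>
          (PySem.List.pyRange 0 ((PySem.List.pyGetD grid 0 []).length : Int)).foldl (fun cs col =>
            if PySem.List.pyGetD (PySem.List.pyGetD grid row []) col "" == value then cs ++ [(row, col)]
            else cs) cs) []
      if coords ≠ [] then acc ++ [(value, coords)] else acc) []
  (PySem.Dict.ofList (PySem.List.sorted2 items (fun it => -(it.2.length : Int))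
      (fun it => toLex (PySem.List.pyGetD it.2 0 (0, 0))))).items

-- ===== PRECONDITION & SPEC =====
-- Pre_ excludes exactly the ragged grids on which a row is SHORTER than the first row:
-- there Python A raises IndexError at grid[row][col] (col ranges over len(grid[0])).
def Pre_get_pixel_coords (grid : List (List String)) : Prop :=
  ∀ row ∈ grid, (grid.getD 0 []).length ≤ row.length
instance (grid : List (List String)) : Decidable (Pre_get_pixel_coords grid) := by unfold Pre_get_pixel_coords; infer_instance

def pvWitness_get_pixel_coords : List (List String) := [["a", "b"], ["b", "a"]]

def Spec_get_pixel_coords (grid : List (List String)) (out : List (String × List (Int × Int))) : Prop := out = get_pixel_coords_alt grid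
instance (grid : List (List String)) (out : List (String × List (Int × Int))) : Decidable (Spec_get_pixel_coords grid out) := by unfold Spec_get_pixel_coords; infer_instance

-- ===== CLAIM (what is proved, stated in full; the proofs are below) =====
def Claim_equal_get_pixel_coords : Prop := ∀ (grid : List (List String)), Dom_get_pixel_coords grid → Pre_get_pixel_coords grid → Spec_get_pixel_coords grid (get_pixel_coords grid)

-- ===== LEMMAS AND PROOFS =====

-- the effective grid geometry both programs scan: rows 0..len(grid)-1, cols 0..len(grid[0])-1
def pvW (grid : List (List String)) : Nat := (grid.getD 0 []).length
def pvCell (grid : List (List String)) (r c : Nat) : String := (grid.getD r []).getD c ""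
def pvCells (grid : List (List String)) : List (String × (Int × Int)) :=
  (List.range grid.length).flatMap (fun r =>
    (List.range (pvW grid)).map (fun c => (pvCell grid r c, ((r : Int), (c : Int)))))
def pvStream (grid : List (List String)) : List (String × (Int × Int)) :=
  (pvCells grid).filter (fun p => decide (p.1 ∈ pvAlpha))
def pvCoords (grid : List (List String)) (v : String) : List (Int × Int) :=
  ((pvStream grid).filter (fun p => p.1 == v)).map (fun p => p.2)
def pvF (grid : List (List String)) : String → String × List (Int × Int) := fun v => (v, pvCoords grid v)
def pvK1 : (String × List (Int × Int)) → Int := fun it => -(it.2.length : Int)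
def pvK2 : (String × List (Int × Int)) → Lex (Int × Int) := fun it => toLex (PySem.List.pyGetD it.2 0 (0, 0))
def pvQ (a b : String × List (Int × Int)) : Prop := pvK1 a < pvK1 b ∨ (pvK1 a = pvK1 b ∧ pvK2 a < pvK2 b)

-- the items lists each port sorts
def pvItemsA (grid : List (List String)) : List (String × List (Int × Int)) :=
  (PySem.Set.ofList ((pvStream grid).map (fun p => p.1))).map (pvF grid)
def pvItemsB (grid : List (List String)) : List (String × List (Int × Int)) :=
  (pvAlpha.filter (fun v => decide (pvCoords grid v ≠ []))).map (pvF grid)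

-- ---- generic: a membership-driven fold over a list with no duplicates fires at most once
lemma pv_noop_foldl {β : Type} (L : List String) (s : String) (upd : β → String → β) (d : β)
    (h : s ∉ L) : L.foldl (fun d v => if s == v then upd d v else d) d = d := by
  induction L generalizing d with
  | nil => rfl
  | cons v L ih =>
    simp only [List.mem_cons, not_or] at h
    rw [List.foldl_cons, if_neg (by simp [h.1])]
    exact ih d h.2

lemma pv_match_foldl {β : Type} (L : List String) (hN : L.Nodup) (s : String) (upd : β → String → β) (d : β) :
    L.foldl (fun d v => if s == v then upd d v else d) d = if s ∈ L then upd d s else d := by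
  induction L generalizing d with
  | nil => rfl
  | cons v L ih =>
    rcases List.nodup_cons.mp hN with ⟨hv, hL⟩
    by_cases hsv : s = v
    · subst hsv
      rw [List.foldl_cons, if_pos (by simp), if_pos (List.mem_cons_self)]
      exact pv_noop_foldl L s upd (upd d s) hv
    · rw [List.foldl_cons, if_neg (by simp [hsv]), ih hL d]
      simp [List.mem_cons, hsv]

-- ---- the nested index loops both ports run are a fold over pvCells
lemma pv_grid_foldl {β : Type} (grid : List (List String)) (g : β → String → (Int × Int) → β) (init : β) :
    (PySem.List.pyRange 0 (grid.length : Int)).foldl (fun acc row =>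
      (PySem.List.pyRange 0 ((PySem.List.pyGetD grid 0 []).length : Int)).foldl (fun acc col =>
        g acc (PySem.List.pyGetD (PySem.List.pyGetD grid row []) col "") (row, col)) acc) init
    = (pvCells grid).foldl (fun acc p => g acc p.1 p.2) init := by
  simp [pvCells, pvCell, pvW, PySem.List.pyRange_zero_natCast, List.foldl_map, List.foldl_flatMap,
    PySem.List.pyGetD_zero]

-- ---- characterization of A's dict and items
lemma pv_step_eq (d : PySem.Dict String (List (Int × Int))) (v : String) (rc : Int × Int) :
    (if d.contains v then d.modify v [] (fun l => l ++ [rc]) else d.insert v [rc])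
    = d.modify v [] (fun l => l ++ [rc]) := by
  by_cases h : d.contains v = true
  · rw [if_pos h]
  · rw [if_neg h]
    unfold PySem.Dict.modify
    rw [PySem.Dict.getD_of_not_contains d [] (Bool.eq_false_iff.mpr h)]
    simp

lemma pvA_eq (grid : List (List String)) :
    get_pixel_coords grid
    = (PySem.Dict.ofList (PySem.List.sorted (pvItemsA grid) pvK1)).items := by
  unfold get_pixel_coords
  have halpha : ∀ (s : String) (d : PySem.Dict String (List (Int × Int))) (rc : Int × Int),
      pvAlpha.foldl (fun d value => if s == value then
        (if d.contains value then d.modify value [] (fun l => l ++ [rc]) else d.insert value [rc])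
        else d) d
      = if s ∈ pvAlpha then d.modify s [] (fun l => l ++ [rc]) else d := by
    intro s d rc
    rw [pv_match_foldl pvAlpha (by decide) s
      (fun d value => if d.contains value then d.modify value [] (fun l => l ++ [rc])
        else d.insert value [rc]) d]
    split
    · exact pv_step_eq d s rc
    · rfl
  simp only [halpha]
  rw [pv_grid_foldl grid
    (fun (d : PySem.Dict String (List (Int × Int))) s rc =>
      if s ∈ pvAlpha then d.modify s [] (fun l => l ++ [rc]) else d)
    (PySem.Dict.empty : PySem.Dict String (List (Int × Int)))]
  rw [PySem.List.foldl_ite_eq_foldl_filter (fun (p : String × (Int × Int)) => p.1 ∈ pvAlpha)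
    (fun (d : PySem.Dict String (List (Int × Int))) p => d.modify p.1 [] (fun l => l ++ [p.2]))
    (pvCells grid) (PySem.Dict.empty : PySem.Dict String (List (Int × Int)))]
  have hnd : ((pvStream grid).foldl
      (fun d p => d.modify p.1 [] (fun l => l ++ [p.2])) PySem.Dict.empty).keys.Nodup := by
    exact PySem.Dict.nodup_keys_foldl_modify_key (pvStream grid) (fun p => p.1) []
      (fun _ p => fun l => l ++ [p.2]) PySem.Dict.empty (by simp [PySem.Dict.keys_empty])
  have hitems := PySem.Dict.items_eq_map_keys _ hnd ([] : List (Int × Int))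
  have hkeys : ((pvStream grid).foldl
      (fun d p => d.modify p.1 [] (fun l => l ++ [p.2])) PySem.Dict.empty).keys
      = PySem.Set.ofList ((pvStream grid).map (fun p => p.1)) := by
    rw [PySem.Dict.keys_foldl_modify_key (pvStream grid) (fun p => p.1) []
      (fun _ p => fun l => l ++ [p.2]) PySem.Dict.empty]
    rw [PySem.Dict.keys_empty, PySem.Set.update_nil_left]
  have hgetD : ∀ v, ((pvStream grid).foldl
      (fun d p => d.modify p.1 [] (fun l => l ++ [p.2])) PySem.Dict.empty).getD v []
      = pvCoords grid v := by
    intro v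
    rw [PySem.Dict.getD_foldl_modify_append (pvStream grid) PySem.Dict.empty v]
    rw [PySem.Dict.getD_empty]
    simp [pvCoords]
  have : ((pvStream grid).foldl
      (fun d p => d.modify p.1 [] (fun l => l ++ [p.2])) PySem.Dict.empty).items
      = pvItemsA grid := by
    rw [hitems, hkeys]
    unfold pvItemsA pvF
    exact List.map_congr_left (fun v _ => by rw [hgetD v])
  rw [pvStream] at this
  rw [this]
  rfl

def pvCoordsAll (grid : List (List String)) (v : String) : List (Int × Int) :=
  ((pvCells grid).filter (fun p => p.1 == v)).map (fun p => p.2)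

lemma pv_coordsAll_eq (grid : List (List String)) (v : String) (hv : v ∈ pvAlpha) :
    pvCoordsAll grid v = pvCoords grid v := by
  unfold pvCoordsAll pvCoords pvStream
  rw [List.filter_filter]
  congr 1
  refine List.filter_congr (fun x hx => ?_)
  by_cases h : x.1 = v
  · simp [h, hv]
  · simp [h]

lemma pvB_eq (grid : List (List String)) :
    get_pixel_coords_alt grid
    = (PySem.Dict.ofList (PySem.List.sorted2 (pvItemsB grid) pvK1 pvK2)).items := by
  unfold get_pixel_coords_alt
  have hcoords : ∀ v : String,
      (PySem.List.pyRange 0 (grid.length : Int)).foldl (fun cs row =>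
        (PySem.List.pyRange 0 ((PySem.List.pyGetD grid 0 []).length : Int)).foldl (fun cs col =>
          if PySem.List.pyGetD (PySem.List.pyGetD grid row []) col "" == v then cs ++ [(row, col)]
          else cs) cs) ([] : List (Int × Int))
      = pvCoordsAll grid v := by
    intro v
    rw [pv_grid_foldl grid (fun (cs : List (Int × Int)) s rc => if s == v then cs ++ [rc] else cs)
      ([] : List (Int × Int))]
    rw [PySem.List.foldl_append_if (fun (p : String × (Int × Int)) => p.1 == v) (fun p => p.2)
      (pvCells grid) []]
    simp [pvCoordsAll]
  simp only [hcoords]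
  rw [PySem.List.foldl_append_ite (fun v => pvCoordsAll grid v ≠ [])
    (fun v => (v, pvCoordsAll grid v)) pvAlpha []]
  have hfil : pvAlpha.filter (fun v => decide (pvCoordsAll grid v ≠ []))
      = pvAlpha.filter (fun v => decide (pvCoords grid v ≠ [])) :=
    List.filter_congr (fun x hx => by rw [pv_coordsAll_eq grid x hx])
  rw [hfil]
  have hmap : (pvAlpha.filter (fun v => decide (pvCoords grid v ≠ []))).map
      (fun v => (v, pvCoordsAll grid v)) = pvItemsB grid := by
    unfold pvItemsB pvF
    exact List.map_congr_left (fun x hx => by rw [pv_coordsAll_eq grid x (List.mem_of_mem_filter hx)])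
  rw [List.nil_append, hmap]
  rfl

-- ---- the two items lists are permutations of each other
lemma pv_itemsA_perm_itemsB (grid : List (List String)) : (pvItemsA grid).Perm (pvItemsB grid) := by
  unfold pvItemsA pvItemsB
  refine List.Perm.map _ ?_
  rw [List.perm_ext_iff_of_nodup (PySem.Set.nodup_ofList _)
    (List.Nodup.filter _ (by decide))]
  intro v
  rw [PySem.Set.mem_ofList, List.mem_filter]
  constructor
  · rintro hv
    rw [List.mem_map] at hv
    obtain ⟨p, hp, rfl⟩ := hv
    have h1 := List.mem_filter.mp hp
    refine ⟨by simpa using h1.2, ?_⟩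
    simp only [pvCoords, ne_eq, List.map_eq_nil_iff, List.filter_eq_nil_iff, decide_eq_true_eq]
    intro h
    exact h p hp (by simp)
  · rintro ⟨hv, hne⟩
    have hne' : (pvStream grid).filter (fun p => p.1 == v) ≠ [] := by
      simp only [decide_eq_true_eq, ne_eq] at hne ⊢
      intro h
      exact hne (by simp [pvCoords, h])
    obtain ⟨p, hp⟩ := List.exists_mem_of_ne_nil _ hne'
    have h2 := List.mem_filter.mp hp
    rw [List.mem_map]
    exact ⟨p, h2.1, by simpa using h2.2⟩

-- ---- coordinates appear in strictly increasing lexicographic order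
lemma pv_stream_pairwise (grid : List (List String)) :
    (pvStream grid).Pairwise (fun p q => toLex p.2 < toLex q.2) := by
  refine List.Pairwise.sublist List.filter_sublist ?_
  unfold pvCells
  rw [List.pairwise_flatMap]
  constructor
  · intro r _
    rw [List.pairwise_map]
    refine (List.pairwise_lt_range).imp ?_
    intro a b h
    refine Prod.Lex.lt_iff.mpr (Or.inr ⟨rfl, ?_⟩)
    simp only [ofLex_toLex]
    exact_mod_cast h
  · refine (List.pairwise_lt_range).imp ?_
    intro a b hab x hx y hy
    simp only [List.mem_map] at hx hy
    obtain ⟨c, _, rfl⟩ := hx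
    obtain ⟨c', _, rfl⟩ := hy
    refine Prod.Lex.lt_iff.mpr (Or.inl ?_)
    simp only [ofLex_toLex]
    exact_mod_cast hab

-- ---- a set built from a list is ordered by first occurrence
lemma pv_ofList_idx {α : Type} [BEq α] [LawfulBEq α] (m : List α) :
    (PySem.Set.ofList m).Pairwise (fun u v => List.idxOf u m < List.idxOf v m) := by
  induction m with
  | nil => simp [PySem.Set.ofList]
  | cons x m ih =>
    rw [PySem.Set.ofList_cons]
    refine List.pairwise_cons.mpr ⟨?_, ?_⟩
    · intro y hy
      have hne := ((PySem.Set.mem_discard _ x y).mp hy).2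
      rw [List.idxOf_cons_ne m (Ne.symm hne)]
      simp [List.idxOf_cons_self]
    · have hsub : List.Sublist ((PySem.Set.ofList m).discard x) (PySem.Set.ofList m) :=
        List.filter_sublist
      refine ((ih.sublist hsub).imp_of_mem ?_)
      intro a b ha hb hab
      have hna := ((PySem.Set.mem_discard _ x a).mp ha).2
      have hnb := ((PySem.Set.mem_discard _ x b).mp hb).2
      rw [List.idxOf_cons_ne m (Ne.symm hna), List.idxOf_cons_ne m (Ne.symm hnb)]
      omega

-- ---- A's items are ordered by their first (head) coordinate
lemma pv_itemsA_pairwise (grid : List (List String)) :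
    (pvItemsA grid).Pairwise (fun a b => pvK2 a < pvK2 b) := by
  unfold pvItemsA
  rw [List.pairwise_map]
  refine (pv_ofList_idx ((pvStream grid).map (fun p => p.1))).imp_of_mem ?_
  intro u v hu hv huv
  have hum : u ∈ (pvStream grid).map (fun p => p.1) := (PySem.Set.mem_ofList _ _).mp hu
  have hvm : v ∈ (pvStream grid).map (fun p => p.1) := (PySem.Set.mem_ofList _ _).mp hv
  have hidx : ∀ w : String, List.idxOf w ((pvStream grid).map (fun p => p.1))
      = (pvStream grid).findIdx (fun p => p.1 == w) := by
    intro w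
    show List.findIdx (fun x => x == w) ((pvStream grid).map (fun p => p.1)) = _
    rw [List.findIdx_map]
    rfl
  have hlt : ∀ w : String, w ∈ (pvStream grid).map (fun p => p.1) →
      (pvStream grid).findIdx (fun p => p.1 == w) < (pvStream grid).length := by
    intro w hw
    rw [List.findIdx_lt_length]
    rw [List.mem_map] at hw
    obtain ⟨p, hp, rfl⟩ := hw
    exact ⟨p, hp, by simp⟩
  have hhead : ∀ w : String, (hw : (pvStream grid).findIdx (fun p => p.1 == w) < (pvStream grid).length) →
      pvK2 (pvF grid w)
      = toLex ((pvStream grid)[(pvStream grid).findIdx (fun p => p.1 == w)]).2 := by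
    intro w hw
    show toLex (PySem.List.pyGetD (pvCoords grid w) 0 (0, 0)) = _
    rw [PySem.List.pyGetD_zero, List.getD_eq_getElem?_getD]
    unfold pvCoords
    rw [List.getElem?_map, ← List.head?_eq_getElem?, List.head?_filter,
      List.find?_eq_getElem?_findIdx, List.getElem?_eq_getElem hw]
    rfl
  have hpair := pv_stream_pairwise grid
  rw [List.pairwise_iff_getElem] at hpair
  rw [hidx u, hidx v] at huv
  have hul := hlt u hum
  have hvl := hlt v hvm
  rw [hhead u hul, hhead v hvl]
  exact hpair _ _ hul hvl huv

-- ---- generic stable-insertion-sort order lemmas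
lemma pv_insertBy_pairwise {α : Type} (before : α → α → Bool) (Q : α → α → Prop)
    (hT : ∀ x y z, before x y = true → Q y z → Q x z)
    (x : α) (ys : List α) (hys : ys.Pairwise Q)
    (h1 : ∀ y ∈ ys, before x y = true → Q x y)
    (h2 : ∀ y ∈ ys, before x y = false → Q y x) :
    (PySem.List.insertBy before x ys).Pairwise Q := by
  induction ys with
  | nil => simp [PySem.List.insertBy]
  | cons y ys ih =>
    rw [PySem.List.insertBy]
    rcases List.pairwise_cons.mp hys with ⟨hy, hys'⟩
    by_cases h : before x y = true
    · rw [if_pos h]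
      refine List.pairwise_cons.mpr ⟨?_, hys⟩
      intro z hz
      rcases List.mem_cons.mp hz with rfl | hz'
      · exact h1 _ List.mem_cons_self h
      · exact hT x y z h (hy z hz')
    · rw [if_neg h]
      refine List.pairwise_cons.mpr ⟨?_, ?_⟩
      · intro z hz
        rcases (PySem.List.mem_insertBy before x z ys).mp hz with rfl | hz'
        · exact h2 _ List.mem_cons_self (Bool.eq_false_iff.mpr h)
        · exact hy z hz'
      · exact ih hys' (fun y' hy' h' => h1 y' (List.mem_cons_of_mem _ hy') h')
          (fun y' hy' h' => h2 y' (List.mem_cons_of_mem _ hy') h')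

lemma pv_sortfold_pairwise {α : Type} (before : α → α → Bool) (Q S : α → α → Prop)
    (hT : ∀ x y z, before x y = true → Q y z → Q x z)
    (hA1 : ∀ a b, S a b → before b a = true → Q b a)
    (hA2 : ∀ a b, S a b → before b a = false → Q a b)
    (l : List α) (hl : l.Pairwise S) :
    (l.foldl (fun acc x => PySem.List.insertBy before x acc) []).Pairwise Q := by
  suffices h : ∀ (l : List α), l.Pairwise S → ∀ (acc : List α), acc.Pairwise Q →
      (∀ y ∈ acc, ∀ x ∈ l, S y x) →
      (l.foldl (fun acc x => PySem.List.insertBy before x acc) acc).Pairwise Q by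
    exact h l hl [] (by simp) (by simp)
  clear hl l
  intro l
  induction l with
  | nil => intro _ acc h _; exact h
  | cons x l ih =>
    intro hl acc hacc hmem
    simp only [List.foldl_cons]
    apply ih (List.pairwise_cons.mp hl).2
    · exact pv_insertBy_pairwise before Q hT x acc hacc
        (fun y hy hb => hA1 y x (hmem y hy x List.mem_cons_self) hb)
        (fun y hy hb => hA2 y x (hmem y hy x List.mem_cons_self) hb)
    · intro y hy x' hx'
      rcases (PySem.List.mem_insertBy before x y acc).mp hy with rfl | hy'
      · exact (List.pairwise_cons.mp hl).1 x' hx'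
      · exact hmem y hy' x' (List.mem_cons_of_mem _ hx')

lemma pv_sortedA_pairwise (grid : List (List String)) :
    (PySem.List.sorted (pvItemsA grid) pvK1).Pairwise pvQ := by
  rw [PySem.List.sorted_eq_foldl_insertBy]
  refine pv_sortfold_pairwise _ pvQ (fun a b => pvK2 a < pvK2 b) ?_ ?_ ?_ _ (pv_itemsA_pairwise grid)
  · intro x y z hxy hyz
    rw [decide_eq_true_eq] at hxy
    rcases hyz with h | ⟨e, _⟩
    · exact Or.inl (hxy.trans h)
    · exact Or.inl (by omega)
  · intro a b _ hba
    rw [decide_eq_true_eq] at hba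
    exact Or.inl hba
  · intro a b hS hba
    rw [decide_eq_false_iff_not, not_lt] at hba
    rcases lt_or_eq_of_le hba with h | h
    · exact Or.inl h
    · exact Or.inr ⟨h, hS⟩

lemma pv_sortedB_pairwise (grid : List (List String)) :
    (PySem.List.sorted2 (pvItemsB grid) pvK1 pvK2).Pairwise pvQ := by
  have hrfl : PySem.List.sorted2 (pvItemsB grid) pvK1 pvK2
      = (pvItemsB grid).foldl (fun acc x => PySem.List.insertBy
          (fun a b => decide (pvK1 a < pvK1 b) || (!decide (pvK1 b < pvK1 a) && decide (pvK2 a < pvK2 b)))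
          x acc) [] := rfl
  rw [hrfl]
  have hSB : (pvItemsB grid).Pairwise (fun a b => pvK2 a ≠ pvK2 b) := by
    have h1 : (pvItemsA grid).Pairwise (fun a b => pvK2 a ≠ pvK2 b) :=
      (pv_itemsA_pairwise grid).imp (fun h => ne_of_lt h)
    exact (List.Perm.pairwise_iff (fun h => Ne.symm h) (pv_itemsA_perm_itemsB grid)).mp h1
  refine pv_sortfold_pairwise _ pvQ (fun a b => pvK2 a ≠ pvK2 b) ?_ ?_ ?_ _ hSB
  · intro x y z hxy hyz
    simp only [Bool.or_eq_true, Bool.and_eq_true, Bool.not_eq_true', decide_eq_true_eq,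
      decide_eq_false_iff_not] at hxy
    rcases hxy with h | ⟨h1, h2⟩
    · rcases hyz with h' | ⟨e, _⟩
      · exact Or.inl (h.trans h')
      · exact Or.inl (by omega)
    · rw [not_lt] at h1
      rcases hyz with h' | ⟨e, h2'⟩
      · exact Or.inl (lt_of_le_of_lt h1 h')
      · rcases lt_or_eq_of_le h1 with hlt | heq
        · exact Or.inl (by omega)
        · exact Or.inr ⟨by omega, h2.trans h2'⟩
  · intro a b hS hba
    simp only [Bool.or_eq_true, Bool.and_eq_true, Bool.not_eq_true', decide_eq_true_eq,
      decide_eq_false_iff_not] at hba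
    rcases hba with h | ⟨h1, h2⟩
    · exact Or.inl h
    · rw [not_lt] at h1
      rcases lt_or_eq_of_le h1 with hlt | heq
      · exact Or.inl hlt
      · exact Or.inr ⟨heq, h2⟩
  · intro a b hS hba
    rcases Bool.or_eq_false_iff.mp hba with ⟨hb1, hb2⟩
    have hk1 : pvK1 a ≤ pvK1 b := not_lt.mp (decide_eq_false_iff_not.mp hb1)
    rcases lt_or_eq_of_le hk1 with hlt | heq
    · exact Or.inl hlt
    · refine Or.inr ⟨heq, ?_⟩
      have h3 : ¬ pvK2 b < pvK2 a := by
        intro hk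
        have : (!decide (pvK1 a < pvK1 b) && decide (pvK2 b < pvK2 a)) = true := by
          simp only [Bool.and_eq_true, Bool.not_eq_true', decide_eq_false_iff_not,
            decide_eq_true_eq]
          exact ⟨by omega, hk⟩
        rw [hb2] at this
        exact Bool.false_ne_true this
      rcases lt_trichotomy (pvK2 a) (pvK2 b) with h | h | h
      · exact h
      · exact absurd h hS
      · exact absurd h h3

lemma pv_main (grid : List (List String)) : get_pixel_coords grid = get_pixel_coords_alt grid := by
  rw [pvA_eq, pvB_eq]
  have hperm : (PySem.List.sorted (pvItemsA grid) pvK1).Perm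
      (PySem.List.sorted2 (pvItemsB grid) pvK1 pvK2) :=
    ((PySem.List.sorted_perm _ _ _).trans (pv_itemsA_perm_itemsB grid)).trans
      (PySem.List.sorted2_perm _ _ _ _).symm
  have heq : PySem.List.sorted (pvItemsA grid) pvK1
      = PySem.List.sorted2 (pvItemsB grid) pvK1 pvK2 := by
    refine List.Perm.eq_of_pairwise ?_ (pv_sortedA_pairwise grid) (pv_sortedB_pairwise grid) hperm
    intro a b _ _ hab hba
    exfalso
    rcases hab with h | ⟨e, h⟩ <;> rcases hba with h' | ⟨e', h'⟩
    · omega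
    · omega
    · omega
    · exact lt_asymm h h'
  rw [heq]

-- ===== VERDICT (by name: the statement is the Claim_ definition above) =====
theorem get_pixel_coords_spec : Claim_equal_get_pixel_coords := by
  intro grid _ _
  unfold Spec_get_pixel_coords
  exact pv_main grid
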